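-- pv_equiv track=rewrite | github.com/Nicortiz72/ICPC_AlgorithmsProblems | Problem set 1/fill.py | solve
-- ===== SOURCE A (Python) =====
-- def test(A,m,mid):
-- 	c=1;cap=mid
-- 	for i in A:
-- 		if(i>mid): return False
-- 		if(i>cap):
-- 			if(c==m): return False
-- 			cap=mid
-- 			c+=1
-- 		cap-=i
-- 	return True
--
-- def solve(A,m):
-- 	hi = 0
-- 	for i in A: hi+=i
-- 	l=1
-- 	r=0
-- 	while(l<=hi):
-- 		mid=(l+hi)//2
-- 		if(test(A,m,mid)):
-- 			r=mid
-- 			hi=mid-1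
-- 		else:
-- 			l=mid+1
-- 	return r
-- ===== SOURCE B (Python) =====
-- def solve(A, m):
--     # Alternative decomposition: feasibility from prefix sums (cut where the prefix
--     # exceeds base+cap) instead of a capacity countdown with early exits, and a
--     # recursive bisection without the running best-so-far variable.
--     prefix = [0]
--     for x in A:
--         prefix.append(prefix[-1] + x)
--
--     def can_pack(cap):
--         if any(x > cap for x in A):
--             return False
--         if m <= 0:
--             return True
--         base = 0
--         cuts = 0
--         for q, p in zip(prefix, prefix[1:]):
--             if p - base > cap:
--                 cuts += 1
--                 base = q
--         return cuts < m
--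
--     def search(lo, hi):
--         if lo > hi:
--             return 0
--         mid = (lo + hi) // 2
--         if can_pack(mid):
--             return search(lo, mid - 1) or mid
--         return search(mid + 1, hi)
--
--     return search(1, sum(A))
-- ===== Notes on version B (the rewrite author's own statement) =====
-- stated objective: alternative
-- what changed: The bisection-on-the-answer scheme must stay (A's result on lists with negative elements depends on the exact search trajectory, so any exactly-equivalent B must probe the same midpoints), but everything else is restructured: feasibility is decided from a materialised prefix-sum list (cut whenever prefix - base exceeds cap, full scan, no early exits, global any() element check) instead of A's capacity-countdown greedy with three early returns, and the search is a recursion without A's running best-so-far variable (left result `or mid` replaces the r/hi bookkeeping).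
import Mathlib
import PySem

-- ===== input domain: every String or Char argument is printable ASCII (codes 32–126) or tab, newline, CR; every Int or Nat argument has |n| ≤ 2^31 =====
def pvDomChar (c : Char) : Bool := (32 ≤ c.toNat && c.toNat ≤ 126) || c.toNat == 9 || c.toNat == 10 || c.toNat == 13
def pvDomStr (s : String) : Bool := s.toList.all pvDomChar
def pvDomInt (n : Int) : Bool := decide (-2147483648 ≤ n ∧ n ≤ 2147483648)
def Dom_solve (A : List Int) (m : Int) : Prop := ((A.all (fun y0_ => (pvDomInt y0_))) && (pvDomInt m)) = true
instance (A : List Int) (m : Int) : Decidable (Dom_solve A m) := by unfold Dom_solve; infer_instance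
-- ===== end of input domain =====

-- B keeps A's bisection scheme (forced: A's value on negative elements is trajectory-dependent) but replaces the
-- countdown greedy by a prefix-sum cut count and the r/hi loop by a plain recursion; return values proved equal.

-- ===== PORT A =====
-- the for-loop of `test` with state (c, cap) and its three early returns
def testLoop (m mid : Int) (c cap : Int) : List Int → Bool
  | [] => true
  | i :: rest =>
    if i > mid then false
    else if i > cap then
      (if c == m then false else testLoop m mid (c + 1) (mid - i) rest)
    else testLoop m mid c (cap - i) rest

def test (A : List Int) (m mid : Int) : Bool := testLoop m mid 1 mid A

-- the while-loop of `solve` with state (l, hi, r)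
def solveLoop (A : List Int) (m : Int) (l hi r : Int) : Int :=
  if h : l ≤ hi then
    let mid := PySem.Int.floordiv (l + hi) 2
    if test A m mid then solveLoop A m l (mid - 1) mid
    else solveLoop A m (mid + 1) hi r
  else r
termination_by (hi + 1 - l).toNat
decreasing_by
  · have := PySem.Int.floordiv_two_mid_bounds (lo := l) (hi := hi) h; omega
  · have := PySem.Int.floordiv_two_mid_bounds (lo := l) (hi := hi) h; omega

def solve (A : List Int) (m : Int) : Int :=
  solveLoop A m 1 (A.foldl (· + ·) 0) 0

-- ===== PORT B =====
-- prefix = [0]; for x in A: prefix.append(prefix[-1] + x)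
def buildPrefix (t : Int) : List Int → List Int
  | [] => [t]
  | x :: xs => t :: buildPrefix (t + x) xs

-- for q, p in zip(prefix, prefix[1:]): …  with state (base, cuts)
def cutsLoop (cap : Int) (base cuts : Int) : List (Int × Int) → Int
  | [] => cuts
  | (q, p) :: rest =>
    if p - base > cap then cutsLoop cap q (cuts + 1) rest
    else cutsLoop cap base cuts rest

def canPack (A : List Int) (m : Int) (pre : List Int) (cap : Int) : Bool :=
  if A.any (fun x => decide (x > cap)) then false
  else if m ≤ 0 then true
  else decide (cutsLoop cap 0 0 (pre.zip pre.tail) < m)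

def searchAlt (A : List Int) (m : Int) (pre : List Int) (lo hi : Int) : Int :=
  if h : lo > hi then 0
  else
    let mid := PySem.Int.floordiv (lo + hi) 2
    if canPack A m pre mid then
      -- Python's `search(lo, mid - 1) or mid` on ints
      let s := searchAlt A m pre lo (mid - 1)
      if s ≠ 0 then s else mid
    else searchAlt A m pre (mid + 1) hi
termination_by (hi + 1 - lo).toNat
decreasing_by
  · have := PySem.Int.floordiv_two_mid_bounds (lo := lo) (hi := hi) (by omega); omega
  · have := PySem.Int.floordiv_two_mid_bounds (lo := lo) (hi := hi) (by omega); omega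

def solve_alt (A : List Int) (m : Int) : Int :=
  let pre := buildPrefix 0 A
  searchAlt A m pre 1 (A.foldl (· + ·) 0)

-- ===== PRECONDITION & SPEC =====
def Spec_solve (A : List Int) (m : Int) (out : Int) : Prop := out = solve_alt A m
instance (A : List Int) (m : Int) (out : Int) : Decidable (Spec_solve A m out) := by unfold Spec_solve; infer_instance

-- ===== CLAIM (what is proved, stated in full; the proofs are below) =====
def Claim_equal_solve : Prop := ∀ (A : List Int) (m : Int), Dom_solve A m → Spec_solve A m (solve A m)

-- ===== LEMMAS AND PROOFS =====

-- the capacity-countdown cut count of A's greedy, the common yardstick of both feasibility tests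
def cutsRun (mid : Int) (r : Int) : List Int → Int
  | [] => 0
  | i :: rest => if i > r then 1 + cutsRun mid (mid - i) rest else cutsRun mid (r - i) rest

theorem cutsRun_nonneg (mid : Int) : ∀ (A : List Int) (r : Int), 0 ≤ cutsRun mid r A := by
  intro A
  induction A with
  | nil => intro r; simp [cutsRun]
  | cons i rest ih => intro r; simp only [cutsRun]; split <;> [linarith [ih (mid - i)]; exact ih (r - i)]

theorem buildPrefix_head : ∀ (xs : List Int) (t : Int), ∃ tl, buildPrefix t xs = t :: tl := by
  intro xs t
  cases xs with
  | nil => exact ⟨[], rfl⟩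
  | cons x xs => exact ⟨buildPrefix (t + x) xs, rfl⟩

-- B's prefix-pair fold equals A's countdown cut count, under the invariant "remaining = cap - (t - base)"
theorem cutsLoop_eq (cap : Int) :
    ∀ (A : List Int) (t b k : Int),
      cutsLoop cap b k ((buildPrefix t A).zip (buildPrefix t A).tail)
        = k + cutsRun cap (cap - (t - b)) A := by
  intro A
  induction A with
  | nil => intro t b k; simp [buildPrefix, cutsLoop, cutsRun]
  | cons x xs ih =>
    intro t b k
    obtain ⟨tl, htl⟩ := buildPrefix_head xs (t + x)
    have hz : (buildPrefix t (x :: xs)).zip (buildPrefix t (x :: xs)).tail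
        = (t, t + x) :: (buildPrefix (t + x) xs).zip (buildPrefix (t + x) xs).tail := by
      show ((t :: buildPrefix (t + x) xs).zip (buildPrefix (t + x) xs)) = _
      rw [htl]; rfl
    rw [hz]
    simp only [cutsLoop, cutsRun]
    by_cases hc : (t + x) - b > cap
    · rw [if_pos hc, if_pos (by omega), ih (t + x) t (k + 1)]
      ring_nf
    · rw [if_neg hc, if_neg (by omega), ih (t + x) b k]
      ring_nf

-- A's test with m ≥ 1: early-exit greedy = "all fit" together with a bound on the full cut count
theorem testLoop_ge1 (m mid : Int) (_hm : 1 ≤ m) :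
    ∀ (A : List Int) (c cap : Int), c ≤ m →
      testLoop m mid c cap A
        = (A.all (fun i => decide (i ≤ mid)) && decide (c + cutsRun mid cap A ≤ m)) := by
  intro A
  induction A with
  | nil => intro c cap hc; simp [testLoop, cutsRun, hc]
  | cons i rest ih =>
    intro c cap hc
    by_cases h1 : i > mid
    · simp [testLoop, h1, show ¬ i ≤ mid by omega]
    · by_cases h2 : i > cap
      · by_cases h3 : c = m
        · have hn := cutsRun_nonneg mid rest (mid - i)
          simp [testLoop, cutsRun, h1, h2, h3, show i ≤ mid by omega,
            show ¬(m + (1 + cutsRun mid (mid - i) rest) ≤ m) by omega]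
        · simp only [testLoop, cutsRun, List.all_cons, if_neg h1, if_pos h2,
            if_neg (show ¬ ((c == m) = true) by simpa using h3)]
          rw [ih (c + 1) (mid - i) (by omega)]
          simp only [show i ≤ mid by omega, decide_true, Bool.true_and]
          congr 1
          exact decide_eq_decide.mpr (by omega)
      · simp only [testLoop, cutsRun, List.all_cons, if_neg h1, if_neg h2]
        rw [ih c (cap - i) hc]
        simp [show i ≤ mid by omega]

-- A's test with m ≤ 0: the group counter never reaches m, so only "all fit" matters
theorem testLoop_le0 (m mid : Int) (_hm : m ≤ 0) :
    ∀ (A : List Int) (c cap : Int), 1 ≤ c →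
      testLoop m mid c cap A = A.all (fun i => decide (i ≤ mid)) := by
  intro A
  induction A with
  | nil => intro c cap hc; simp [testLoop]
  | cons i rest ih =>
    intro c cap hc
    simp only [testLoop, List.all_cons]
    by_cases h1 : i > mid
    · simp [h1]
    · rw [if_neg h1]
      by_cases h2 : i > cap
      · rw [if_pos h2, if_neg (by simp; omega), ih (c + 1) (mid - i) (by omega)]
        simp [show i ≤ mid by omega]
      · rw [if_neg h2, ih c (cap - i) hc]
        simp [show i ≤ mid by omega]

-- pointwise equality of the two feasibility tests
theorem canPack_eq_test (A : List Int) (m mid : Int) :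
    canPack A m (buildPrefix 0 A) mid = test A m mid := by
  unfold canPack test
  have hany : A.any (fun x => decide (x > mid)) = !A.all (fun i => decide (i ≤ mid)) := by
    induction A with
    | nil => simp
    | cons x xs ih =>
      by_cases h : x > mid
      · simp [h, show ¬ x ≤ mid by omega]
      · simp [h, ih, show x ≤ mid by omega]
  cases hall : A.all (fun i => decide (i ≤ mid)) with
  | false =>
    rw [hany, hall]
    simp only [Bool.not_false, if_true]
    by_cases hm : m ≤ 0
    · rw [testLoop_le0 m mid hm A 1 mid le_rfl, hall]
    · rw [testLoop_ge1 m mid (by omega) A 1 mid (by omega), hall, Bool.false_and]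
  | true =>
    rw [hany, hall]
    simp only [Bool.not_true, Bool.false_eq_true, if_false]
    by_cases hm : m ≤ 0
    · rw [if_pos hm, testLoop_le0 m mid hm A 1 mid le_rfl, hall]
    · rw [if_neg hm, testLoop_ge1 m mid (by omega) A 1 mid (by omega), hall, Bool.true_and,
        cutsLoop_eq mid A 0 0 0]
      simp only [sub_self, sub_zero, zero_add]
      exact decide_eq_decide.mpr (by omega)

-- A's loop with running best r equals B's recursion with `or`-combination, by strong
-- induction on the interval length
theorem loop_eq_search (A : List Int) (m : Int) :
    ∀ (n : Nat) (l hi r : Int), (hi + 1 - l).toNat = n → 1 ≤ l →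
      solveLoop A m l hi r
        = (if searchAlt A m (buildPrefix 0 A) l hi = 0 then r
           else searchAlt A m (buildPrefix 0 A) l hi) := by
  intro n
  induction n using Nat.strongRecOn with
  | ind n ih =>
    intro l hi r hn hl
    by_cases h : l ≤ hi
    · have hb := PySem.Int.floordiv_two_mid_bounds (lo := l) (hi := hi) h
      rw [solveLoop, dif_pos h, searchAlt, dif_neg (by omega)]
      set md := PySem.Int.floordiv (l + hi) 2 with hmd
      simp only [canPack_eq_test A m]
      by_cases ht : test A m md = true
      · simp only [ht, if_true]
        rw [ih ((md - 1) + 1 - l).toNat (by omega) l (md - 1) md rfl hl]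
        by_cases hs : searchAlt A m (buildPrefix 0 A) l (md - 1) = 0
        · rw [if_pos hs, if_neg (not_not_intro hs), if_neg (show ¬ (md = 0) by omega)]
        · rw [if_neg hs, if_pos hs, if_neg hs]
      · simp only [ht, if_false, Bool.false_eq_true]
        exact ih ((hi + 1) - (md + 1)).toNat (by omega) (md + 1) hi r rfl (by omega)
    · rw [solveLoop, dif_neg h, searchAlt, dif_pos (by omega)]
      simp

-- ===== VERDICT (by name: the statement is the Claim_ definition above) =====
theorem solve_spec : Claim_equal_solve := by
  intro A m _
  unfold Spec_solve solve solve_alt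
  rw [loop_eq_search A m _ 1 (A.foldl (· + ·) 0) 0 rfl le_rfl]
  split <;> simp_all
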